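-- pv_equiv track=rewrite | github.com/Murodjon002/Best-Works | List placeholder/List11.py | func
-- ===== SOURCE A (Python) =====
-- def func(n):
--     list1=[]
--     m=1
--     s=0
--     while n>s:
--         list1.append(m)
--         m*=2
--         s+=1
--     return list1[::-1]
-- ===== SOURCE B (Python) =====
-- def func(n):
--     return [1 << i for i in range(n - 1, -1, -1)]
-- ===== Notes on version B (the rewrite author's own statement) =====
-- stated objective: simpler
-- what changed: Replaces the accumulator loop (running product m, counter s, final slice-reversal) with a single comprehension that computes 1 << i directly over the descending range(n-1,-1,-1), eliminating the mutable state, the ascending intermediate list and the reversal pass.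
import Mathlib
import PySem

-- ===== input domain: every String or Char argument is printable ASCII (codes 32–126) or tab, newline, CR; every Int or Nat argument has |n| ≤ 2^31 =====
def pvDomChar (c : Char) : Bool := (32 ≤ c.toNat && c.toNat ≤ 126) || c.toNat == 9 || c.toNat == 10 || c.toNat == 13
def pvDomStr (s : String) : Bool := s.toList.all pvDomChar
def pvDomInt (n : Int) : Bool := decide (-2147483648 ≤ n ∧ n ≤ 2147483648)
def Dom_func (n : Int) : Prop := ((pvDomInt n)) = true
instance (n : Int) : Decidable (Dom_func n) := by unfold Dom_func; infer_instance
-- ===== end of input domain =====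

-- B replaces the accumulator loop and slice-reversal with one comprehension over a descending range (simpler).

-- ===== PORT A =====
-- while n > s: list1.append(m); m *= 2; s += 1   (fuel = remaining iterations, n.toNat ≥ (n - s).toNat at entry)
def funcLoop (fuel : Nat) (n : Int) (list1 : List Int) (m s : Int) : List Int :=
  match fuel with
  | 0 => list1
  | fuel + 1 => if n > s then funcLoop fuel n (list1 ++ [m]) (m * 2) (s + 1) else list1

def func (n : Int) : List Int :=
  -- list1[::-1]; slice? with step -1 is never none
  (PySem.List.slice? (funcLoop n.toNat n [] 1 0) none none (-1)).getD []

-- ===== PORT B =====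
-- [1 << i for i in range(n - 1, -1, -1)]; every i in the range satisfies 0 ≤ i, so <<< i.toNat is exact
def func_alt (n : Int) : List Int :=
  (PySem.List.pyRange (n - 1) (-1) (-1)).map (fun i => (1 : Int) <<< i.toNat)

-- ===== PRECONDITION & SPEC =====
def Spec_func (n : Int) (out : List Int) : Prop := out = func_alt n
instance (n : Int) (out : List Int) : Decidable (Spec_func n out) := by unfold Spec_func; infer_instance

-- ===== CLAIM (what is proved, stated in full; the proofs are below) =====
def Claim_equal_func : Prop := ∀ (n : Int), Dom_func n → Spec_func n (func n)

-- ===== LEMMAS AND PROOFS =====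

theorem one_shiftLeft_eq (e : Nat) : (1 : Int) <<< (e : Int) = 2 ^ e := by
  rw [Int.shiftLeft_eq_mul_pow, one_mul]; push_cast; rfl

theorem funcLoop_eq (n : Int) : ∀ (fuel : Nat) (list1 : List Int) (m s : Int),
    (n - s).toNat ≤ fuel →
    funcLoop fuel n list1 m s
      = list1 ++ (List.range (n - s).toNat).map (fun j => m * 2 ^ j) := by
  intro fuel
  induction fuel with
  | zero =>
    intro list1 m s hk
    have : (n - s).toNat = 0 := by omega
    simp [funcLoop, this]
  | succ fuel ih =>
    intro list1 m s hk
    by_cases h : n > s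
    · rw [funcLoop, if_pos h, ih (list1 ++ [m]) (m * 2) (s + 1) (by omega)]
      have hs : (n - s).toNat = (n - (s + 1)).toNat + 1 := by omega
      rw [hs, List.range_succ_eq_map]
      simp [List.map_map, Function.comp, mul_comm, mul_assoc, pow_succ]
    · have : (n - s).toNat = 0 := by omega
      simp [funcLoop, if_neg h, this]

theorem func_eq (n : Int) :
    func n = ((List.range n.toNat).map (fun j => (2 : Int) ^ j)).reverse := by
  unfold func
  rw [PySem.List.slice?_none_none_neg_one, Option.getD_some]
  rw [funcLoop_eq n n.toNat [] 1 0 (by omega)]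
  simp

theorem func_spec : Claim_equal_func := by
  intro n _
  unfold Spec_func func_alt
  rw [func_eq, PySem.List.pyRange_neg_one, List.map_map]
  simp only [Function.comp_def, one_shiftLeft_eq]
  have hM : (n - 1 - -1).toNat = n.toNat := by omega
  rw [hM]
  apply List.ext_getElem
  · simp
  · intro k h1 h2
    simp only [List.length_reverse, List.length_map, List.length_range] at h1
    simp only [List.getElem_reverse, List.getElem_map, List.getElem_range,
      List.length_map, List.length_range]
    congr 1
    omega
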